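-- pv_equiv track=rewrite | github.com/StevenVdEeckt/Thesis | Thesis/LM_HelpFunctions.py | trees_and_local_indices
-- ===== SOURCE A (Python) =====
-- def trees_and_local_indices(near_dist_list, k_neighbors = 1):
--
--     tree_indices = []
--     local_indices = []
--
--     for i in range(k_neighbors):
--         index = near_dist_list.index(min(near_dist_list))
--         tree_indices.append(index // k_neighbors)
--         local_indices.append(index)
--         near_dist_list.pop(index)
--
--     return tree_indices, local_indices
-- ===== SOURCE B (Python) =====
-- def trees_and_local_indices(near_dist_list, k_neighbors=1):
--     # Sort indices once (stable), take the k smallest; recover each "shrinking-list"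
--     # position by subtracting the earlier-removed smaller indices.
--     order = sorted(range(len(near_dist_list)), key=lambda i: near_dist_list[i])
--     sel = order[:max(k_neighbors, 0)]
--     tree_indices = []
--     local_indices = []
--     prev = []
--     for idx in sel:
--         local = idx - sum(1 for j in prev if j < idx)
--         tree_indices.append(local // k_neighbors)
--         local_indices.append(local)
--         prev.append(idx)
--     # same side effect as A: remove the selected elements from the caller's list
--     for idx in sorted(sel, reverse=True):
--         near_dist_list.pop(idx)
--     return tree_indices, local_indices
-- ===== Notes on version B (the rewrite author's own statement) =====
-- stated objective: faster
-- what changed: Replaces A's k rounds of min()+.index()+.pop() full scans over the shrinking list by one stable sort of the indices by value, taking the first k and recovering each shrinking-list position as index minus the count of earlier-removed smaller indices.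
import Mathlib
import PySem

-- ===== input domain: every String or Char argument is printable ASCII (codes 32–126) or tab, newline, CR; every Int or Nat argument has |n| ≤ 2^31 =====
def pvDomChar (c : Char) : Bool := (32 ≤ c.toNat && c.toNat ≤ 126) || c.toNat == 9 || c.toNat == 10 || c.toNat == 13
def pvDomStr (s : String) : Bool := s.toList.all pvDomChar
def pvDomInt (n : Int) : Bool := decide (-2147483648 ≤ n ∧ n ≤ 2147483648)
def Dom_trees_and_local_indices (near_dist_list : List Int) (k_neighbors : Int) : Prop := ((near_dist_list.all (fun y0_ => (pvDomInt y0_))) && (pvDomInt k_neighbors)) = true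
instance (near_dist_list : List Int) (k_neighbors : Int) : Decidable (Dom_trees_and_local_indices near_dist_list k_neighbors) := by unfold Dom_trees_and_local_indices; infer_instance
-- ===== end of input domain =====

-- B replaces A's k repeated min/index/pop scans by one stable sort of the indices plus
-- a count of earlier-removed smaller indices per selection (equivalence is about the
-- return value; both Pythons remove the same k elements from the argument list).

-- ===== PORT A =====
def pvAStep (k : Int) (st : List Int × List Int × List Int) : List Int × List Int × List Int :=
  match st with
  | (ti, li, lst) =>
    match PySem.List.min? lst (fun x => x) with
    | none => (ti, li, lst)            -- unreachable under Pre_: min([]) raises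
    | some m =>
      match PySem.List.index? lst m with
      | none => (ti, li, lst)          -- unreachable: the min is in the list
      | some idx =>
        match PySem.List.pop? lst (idx : Int) with
        | none => (ti, li, lst)        -- unreachable: idx is in range
        | some r => (ti ++ [PySem.Int.floordiv (idx : Int) k], li ++ [(idx : Int)], r.2)

def trees_and_local_indices (near_dist_list : List Int) (k_neighbors : Int) : List Int × List Int :=
  let st := (PySem.List.pyRange 0 k_neighbors 1).foldl
      (fun st _ => pvAStep k_neighbors st) ([], [], near_dist_list)
  (st.1, st.2.1)

-- ===== PORT B =====
def pvBStep (k : Int) (st : List Int × List Int × List Int) (idx : Int) : List Int × List Int × List Int :=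
  match st with
  | (ti, li, prev) =>
    let lo := idx - prev.foldl (fun s j => if j < idx then s + 1 else s) (0 : Int)
    (ti ++ [PySem.Int.floordiv lo k], li ++ [lo], prev ++ [idx])

def trees_and_local_indices_alt (near_dist_list : List Int) (k_neighbors : Int) : List Int × List Int :=
  let order := PySem.List.sorted (PySem.List.pyRange 0 (PySem.List.len near_dist_list) 1)
      (fun i => PySem.List.pyGetD near_dist_list i 0) false
  let sel := PySem.List.slice order none (some (max k_neighbors 0))
  let st := sel.foldl (pvBStep k_neighbors) ([], [], [])
  (st.1, st.2.1)

-- ===== PRECONDITION & SPEC =====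
-- Pre_ excludes exactly the inputs where A raises: k_neighbors > len(near_dist_list)
-- makes min() hit an empty list (ValueError).
def Pre_trees_and_local_indices (near_dist_list : List Int) (k_neighbors : Int) : Prop :=
  k_neighbors ≤ (near_dist_list.length : Int)
instance (near_dist_list : List Int) (k_neighbors : Int) : Decidable (Pre_trees_and_local_indices near_dist_list k_neighbors) := by unfold Pre_trees_and_local_indices; infer_instance

def pvWitness_trees_and_local_indices : List Int × Int := ([3, 1, 2], 2)

def Spec_trees_and_local_indices (near_dist_list : List Int) (k_neighbors : Int) (out : List Int × List Int) : Prop := out = trees_and_local_indices_alt near_dist_list k_neighbors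
instance (near_dist_list : List Int) (k_neighbors : Int) (out : List Int × List Int) : Decidable (Spec_trees_and_local_indices near_dist_list k_neighbors out) := by unfold Spec_trees_and_local_indices; infer_instance

-- ===== CLAIM (what is proved, stated in full; the proofs are below) =====
def Claim_equal_trees_and_local_indices : Prop := ∀ (near_dist_list : List Int) (k_neighbors : Int), Dom_trees_and_local_indices near_dist_list k_neighbors → Pre_trees_and_local_indices near_dist_list k_neighbors → Spec_trees_and_local_indices near_dist_list k_neighbors (trees_and_local_indices near_dist_list k_neighbors)


-- ===== LEMMAS AND PROOFS =====

-- lexicographic (value, index) order: the order in which A's greedy selection removes indices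
def pvLex (val : Int → Int) (a b : Int) : Prop := val a < val b ∨ (val a = val b ∧ a < b)

lemma pvLex_le {val : Int → Int} {a b : Int} (h : pvLex val a b) : val a ≤ val b := by
  rcases h with h | ⟨h, _⟩ <;> omega

-- B's counting loop is countP
lemma pvFoldlCount (c : Int) : ∀ (l : List Int) (s : Int),
    l.foldl (fun s j => if j < c then s + 1 else s) s = s + (l.countP (fun j => decide (j < c)) : Int) := by
  intro l
  induction l with
  | nil => intro s; simp
  | cons x t ih =>
    intro s
    by_cases h : x < c <;> simp [List.countP_cons, h, ih] <;> ring

-- min? when a least value is known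
lemma pvMinEq (xs : List Int) (v : Int) (hv : v ∈ xs) (hle : ∀ y ∈ xs, v ≤ y) :
    PySem.List.min? xs (fun x => x) = some v := by
  cases h : PySem.List.min? xs (fun x => x) with
  | none =>
    rw [PySem.List.min?_eq_none_iff] at h
    subst h; simp at hv
  | some m =>
    have hm : m ∈ xs := PySem.List.min?_mem h
    have h1 : v ≤ m := hle m hm
    have h2 : m ≤ v := by simpa using PySem.List.min?_isMin h v hv
    exact congrArg some (le_antisymm h2 h1)

-- first occurrence in xs ++ v :: ys when v is not in xs
lemma pvIndexMid (xs ys : List Int) (v : Int) (h : v ∉ xs) :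
    PySem.List.index? (xs ++ v :: ys) v = some xs.length := by
  rw [PySem.List.index?_eq_some_iff]
  exact ⟨xs, ys, rfl, rfl, h⟩

lemma pvEraseMid {α : Type} (v : α) (ys : List α) :
    ∀ (xs : List α), (xs ++ v :: ys).eraseIdx xs.length = xs ++ ys := by
  intro xs; induction xs with
  | nil => simp
  | cons x t ih => simp [List.eraseIdx, ih]

lemma pvPopMid (xs ys : List Int) (v : Int) :
    PySem.List.pop? (xs ++ v :: ys) (xs.length : Int) = some (v, xs ++ ys) := by
  rw [PySem.List.pop?_natCast (xs ++ v :: ys) xs.length (by simp)]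
  have hget : (xs ++ v :: ys)[xs.length]'(by simp) = v := by
    rw [List.getElem_append_right (le_refl xs.length)]
    simp
  rw [hget, pvEraseMid]

lemma pvCountRange (n c : Int) (h0 : 0 ≤ c) (hn : c ≤ n) :
    (PySem.List.pyRange 0 n 1).countP (fun j => decide (j < c)) = c.toNat := by
  rw [PySem.List.pyRange_one_append 0 c n h0 hn, List.countP_append]
  have h1 : (PySem.List.pyRange 0 c 1).countP (fun j => decide (j < c))
      = (PySem.List.pyRange 0 c 1).length := by
    rw [List.countP_eq_length]
    intro a ha
    rw [PySem.List.mem_pyRange_one] at ha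
    simpa using ha.2
  have h2 : (PySem.List.pyRange c n 1).countP (fun j => decide (j < c)) = 0 := by
    rw [List.countP_eq_zero]
    intro a ha
    rw [PySem.List.mem_pyRange_one] at ha
    simp; omega
  rw [h1, h2, PySem.List.length_pyRange_one]
  omega

-- stability of the insertion sort: sorted by value is lexicographically sorted by
-- (value, index) when the input indices are strictly increasing
lemma pvInsertByStable (val : Int → Int) (x : Int) :
    ∀ (acc : List Int), acc.Pairwise (pvLex val) → (∀ y ∈ acc, y < x) →
    (PySem.List.insertBy (fun a b => decide (val a < val b)) x acc).Pairwise (pvLex val) := by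
  intro acc
  induction acc with
  | nil => intro _ _; simp [PySem.List.insertBy]
  | cons y ys ih =>
    intro hp hlt
    rw [List.pairwise_cons] at hp
    by_cases h : val x < val y
    · simp only [PySem.List.insertBy, h, decide_true, if_true]
      rw [List.pairwise_cons]
      refine ⟨?_, List.pairwise_cons.2 hp⟩
      intro z hz
      rcases List.mem_cons.1 hz with rfl | hz
      · exact Or.inl h
      · have := pvLex_le (hp.1 z hz)
        exact Or.inl (by omega)
    · simp only [PySem.List.insertBy, h, decide_false, Bool.false_eq_true, if_false]
      rw [List.pairwise_cons]
      constructor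
      · intro z hz
        rw [PySem.List.mem_insertBy] at hz
        rcases hz with rfl | hz
        · rcases lt_or_eq_of_le (le_of_not_gt h) with h' | h'
          · exact Or.inl h'
          · exact Or.inr ⟨h', hlt y List.mem_cons_self⟩
        · exact hp.1 z hz
      · exact ih hp.2 (fun z hz => hlt z (List.mem_cons_of_mem y hz))

lemma pvFoldlStable (val : Int → Int) :
    ∀ (xs acc : List Int), acc.Pairwise (pvLex val) → xs.Pairwise (· < ·) →
    (∀ y ∈ acc, ∀ x ∈ xs, y < x) →
    (xs.foldl (fun acc x => PySem.List.insertBy (fun a b => decide (val a < val b)) x acc) acc).Pairwise (pvLex val) := by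
  intro xs
  induction xs with
  | nil => intro acc h _ _; simpa using h
  | cons x t ih =>
    intro acc hacc hxs hcross
    rw [List.pairwise_cons] at hxs
    simp only [List.foldl_cons]
    apply ih
    · exact pvInsertByStable val x acc hacc (fun y hy => hcross y hy x (List.mem_cons_self))
    · exact hxs.2
    · intro y hy z hz
      rw [PySem.List.mem_insertBy] at hy
      rcases hy with rfl | hy
      · exact hxs.1 z hz
      · exact hcross y hy z (List.mem_cons_of_mem x hz)

lemma pvOrdStable (val : Int → Int) (xs : List Int) (h : xs.Pairwise (· < ·)) :
    (PySem.List.sorted xs val false).Pairwise (pvLex val) := by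
  rw [PySem.List.sorted_eq_foldl_insertBy]
  exact pvFoldlStable val xs [] (by simp) h (by simp)

lemma pvFoldlConst {α β : Type} (f : α → α) :
    ∀ (L : List β) (init : α), L.foldl (fun st _ => f st) init = f^[L.length] init := by
  intro L
  induction L with
  | nil => intro init; simp
  | cons x t ih => intro init; simp [ih, Function.iterate_succ_apply]

-- the master invariant: A's remaining pair list q versus B's selected prefix prev
lemma pvMain (val : Int → Int) (k n : Int) :
    ∀ (m : Nat) (q : List (Int × Int)) (osuf prev ti li : List Int),
      m ≤ q.length →
      (q.map Prod.fst).Perm osuf →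
      (q.map Prod.fst).Pairwise (· < ·) →
      osuf.Pairwise (pvLex val) →
      (∀ p ∈ q, p.2 = val p.1) →
      ((q.map Prod.fst) ++ prev).Perm (PySem.List.pyRange 0 n 1) →
      ((pvAStep k)^[m] (ti, li, q.map Prod.snd)).1
          = ((osuf.take m).foldl (pvBStep k) (ti, li, prev)).1
        ∧ ((pvAStep k)^[m] (ti, li, q.map Prod.snd)).2.1
          = ((osuf.take m).foldl (pvBStep k) (ti, li, prev)).2.1 := by
  intro m
  induction m with
  | zero => intro q osuf prev ti li _ _ _ _ _ _; simp
  | succ m ih =>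
    intro q osuf prev ti li hm hperm hinc hlex hval hcover
    have hlen : (q.map Prod.fst).length = osuf.length := hperm.length_eq
    cases osuf with
    | nil => simp at hlen; simp [hlen] at hm
    | cons c rest =>
    have hc : c ∈ q.map Prod.fst := hperm.mem_iff.2 List.mem_cons_self
    obtain ⟨p, hpq, hpc⟩ := List.mem_map.1 hc
    obtain ⟨q1, q2, rfl⟩ := List.append_of_mem hpq
    have hpv : p.2 = val c := by rw [hval p hpq, hpc]
    have hqf : (q1 ++ p :: q2).map Prod.fst = q1.map Prod.fst ++ c :: q2.map Prod.fst := by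
      simp [hpc]
    have hqs : (q1 ++ p :: q2).map Prod.snd
        = q1.map Prod.snd ++ val c :: q2.map Prod.snd := by
      simp [hpv]
    rw [hqf] at hperm hinc hcover
    -- every remaining index is c or lex-after c
    have hall : ∀ j ∈ q1.map Prod.fst ++ c :: q2.map Prod.fst, j = c ∨ pvLex val c j := by
      intro j hj
      by_cases hjc : j = c
      · exact Or.inl hjc
      · have hjr : j ∈ c :: rest := hperm.mem_iff.1 hj
        have hjrest : j ∈ rest := by
          rcases List.mem_cons.1 hjr with h | h
          · exact absurd h hjc
          · exact h
        exact Or.inr ((List.pairwise_cons.1 hlex).1 j hjrest)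
    have hpw := List.pairwise_append.1 hinc
    -- the three primitive calls of A's step
    have hA1 : PySem.List.min? ((q1 ++ p :: q2).map Prod.snd) (fun x => x) = some (val c) := by
      rw [hqs]
      apply pvMinEq
      · exact List.mem_append.2 (Or.inr List.mem_cons_self)
      · intro y hy
        have : y ∈ (q1 ++ p :: q2).map Prod.snd := by rw [hqs]; exact hy
        obtain ⟨p', hp', rfl⟩ := List.mem_map.1 this
        rw [hval p' hp']
        have hj : p'.1 ∈ q1.map Prod.fst ++ c :: q2.map Prod.fst := by
          rw [← hqf]; exact List.mem_map_of_mem hp'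
        rcases hall p'.1 hj with h | h
        · rw [h]
        · exact pvLex_le h
    have hnot : val c ∉ q1.map Prod.snd := by
      intro hcontra
      obtain ⟨p', hp', hps⟩ := List.mem_map.1 hcontra
      have hjlt : p'.1 < c := hpw.2.2 p'.1 (List.mem_map_of_mem hp') c List.mem_cons_self
      have hj : p'.1 ∈ q1.map Prod.fst ++ c :: q2.map Prod.fst :=
        List.mem_append.2 (Or.inl (List.mem_map_of_mem hp'))
      rcases hall p'.1 hj with h | h
      · omega
      · have hv' : val p'.1 = val c := by
          rw [← hval p' (List.mem_append.2 (Or.inl hp')), hps]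
        rcases h with h | ⟨_, h⟩ <;> omega
    have hA2 : PySem.List.index? ((q1 ++ p :: q2).map Prod.snd) (val c)
        = some (q1.map Prod.snd).length := by
      rw [hqs]; exact pvIndexMid _ _ _ hnot
    have hA3 : PySem.List.pop? ((q1 ++ p :: q2).map Prod.snd) ((q1.map Prod.snd).length : Int)
        = some (val c, q1.map Prod.snd ++ q2.map Prod.snd) := by
      rw [hqs]; exact pvPopMid _ _ _
    -- A's recorded position equals B's computed one
    have hcmem : c ∈ PySem.List.pyRange 0 n 1 :=
      hcover.mem_iff.1 (List.mem_append.2 (Or.inl (List.mem_append.2 (Or.inr List.mem_cons_self))))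
    have hcb := (PySem.List.mem_pyRange_one).1 hcmem
    have hcnt1 : (q1.map Prod.fst).countP (fun j => decide (j < c))
        = (q1.map Prod.fst).length := by
      rw [List.countP_eq_length]
      intro a ha
      simpa using hpw.2.2 a ha c List.mem_cons_self
    have hcnt2 : (c :: q2.map Prod.fst).countP (fun j => decide (j < c)) = 0 := by
      rw [List.countP_eq_zero]
      intro a ha
      rcases List.mem_cons.1 ha with rfl | ha
      · simp
      · have := (List.pairwise_cons.1 hpw.2.1).1 a ha
        simp; omega
    have hcntq : ((q1.map Prod.fst ++ c :: q2.map Prod.fst) ++ prev).countP (fun j => decide (j < c))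
        = (PySem.List.pyRange 0 n 1).countP (fun j => decide (j < c)) := hcover.countP_eq _
    rw [pvCountRange n c hcb.1 (le_of_lt hcb.2)] at hcntq
    rw [List.countP_append, List.countP_append, hcnt1, hcnt2, List.length_map] at hcntq
    have hpos : ((q1.map Prod.snd).length : Int)
        = c - (prev.countP (fun j => decide (j < c)) : Int) := by
      rw [List.length_map]
      omega
    -- one step of each loop
    rw [Function.iterate_succ_apply, List.take_succ_cons, List.foldl_cons]
    have hstepA : pvAStep k (ti, li, (q1 ++ p :: q2).map Prod.snd)
        = (ti ++ [PySem.Int.floordiv ((q1.map Prod.snd).length : Int) k],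
           li ++ [((q1.map Prod.snd).length : Int)],
           (q1 ++ q2).map Prod.snd) := by
      simp only [pvAStep, hA1, hA2, hA3]
      simp
    have hstepB : pvBStep k (ti, li, prev) c
        = (ti ++ [PySem.Int.floordiv ((q1.map Prod.snd).length : Int) k],
           li ++ [((q1.map Prod.snd).length : Int)],
           prev ++ [c]) := by
      simp only [pvBStep]
      rw [pvFoldlCount c prev 0]
      simp only [zero_add]
      rw [← hpos]
    rw [hstepA, hstepB]
    -- re-establish the invariant for the tail
    have hq'f : (q1 ++ q2).map Prod.fst = q1.map Prod.fst ++ q2.map Prod.fst := by simp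
    have hmid : (q1.map Prod.fst ++ c :: q2.map Prod.fst).Perm
        (c :: (q1.map Prod.fst ++ q2.map Prod.fst)) := List.perm_middle
    apply ih (q1 ++ q2) rest (prev ++ [c])
    · have := hm
      simp only [List.length_append, List.length_cons] at this ⊢
      omega
    · rw [hq'f]
      exact (hmid.symm.trans hperm).cons_inv
    · rw [hq'f]
      have hsub : (q1.map Prod.fst ++ q2.map Prod.fst).Sublist
          (q1.map Prod.fst ++ c :: q2.map Prod.fst) :=
        List.Sublist.append_left (List.sublist_cons_self c _) _
      exact hinc.sublist hsub
    · exact (List.pairwise_cons.1 hlex).2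
    · intro p' hp'
      apply hval
      rcases List.mem_append.1 hp' with h | h
      · exact List.mem_append.2 (Or.inl h)
      · exact List.mem_append.2 (Or.inr (List.mem_cons_of_mem p h))
    · rw [hq'f]
      have h1 : ((q1.map Prod.fst ++ q2.map Prod.fst) ++ (prev ++ [c])).Perm
          (c :: ((q1.map Prod.fst ++ q2.map Prod.fst) ++ prev)) := by
        rw [← List.append_assoc]
        exact List.perm_append_singleton c _
      have h2 : ((q1.map Prod.fst ++ c :: q2.map Prod.fst) ++ prev).Perm
          (c :: ((q1.map Prod.fst ++ q2.map Prod.fst) ++ prev)) := by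
        have := hmid.append_right prev
        simpa using this
      exact (h1.trans h2.symm).trans hcover

-- ===== VERDICT (by name: the statement is the Claim_ definition above) =====
theorem trees_and_local_indices_spec : Claim_equal_trees_and_local_indices := by
  intro l k _ hpre
  unfold Pre_trees_and_local_indices at hpre
  unfold Spec_trees_and_local_indices trees_and_local_indices trees_and_local_indices_alt
  dsimp only
  have hiter : (PySem.List.pyRange 0 k 1).foldl (fun st _ => pvAStep k st) ([], [], l)
      = (pvAStep k)^[k.toNat] ([], [], l) := by
    rw [pvFoldlConst, PySem.List.length_pyRange_one]
    norm_num
  have hsel : PySem.List.slice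
        (PySem.List.sorted (PySem.List.pyRange 0 (PySem.List.len l) 1)
          (fun i => PySem.List.pyGetD l i 0) false) none (some (max k 0))
      = (PySem.List.sorted (PySem.List.pyRange 0 (PySem.List.len l) 1)
          (fun i => PySem.List.pyGetD l i 0) false).take k.toNat := by
    rw [← Int.toNat_eq_max, PySem.List.slice_to_natCast]
  set val : Int → Int := fun j => PySem.List.pyGetD l j 0 with hvaldef
  set q0 : List (Int × Int) :=
    (PySem.List.pyRange 0 (PySem.List.len l) 1).map (fun j => (j, val j)) with hq0
  have hfst : q0.map Prod.fst = PySem.List.pyRange 0 (PySem.List.len l) 1 := by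
    simp [hq0, List.map_map, Function.comp_def]
  have hsnd : q0.map Prod.snd = l := by
    rw [hq0, List.map_map]
    simpa [Function.comp_def] using PySem.List.map_pyGetD_pyRange_zero l (0 : Int)
  have hpwr : (PySem.List.pyRange 0 (PySem.List.len l) 1).Pairwise (· < ·) :=
    PySem.List.pairwise_lt_pyRange_one 0 (PySem.List.len l)
  have hmain := pvMain val k (PySem.List.len l) k.toNat q0
      (PySem.List.sorted (PySem.List.pyRange 0 (PySem.List.len l) 1) val false) [] [] []
      (by simp [hq0, PySem.List.length_pyRange_one]; omega)
      (by rw [hfst]; exact (PySem.List.sorted_perm _ _ _).symm)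
      (by rw [hfst]; exact hpwr)
      (pvOrdStable val _ hpwr)
      (by
        intro p hp
        rw [hq0] at hp
        obtain ⟨j, _, rfl⟩ := List.mem_map.1 hp
        rfl)
      (by rw [hfst, List.append_nil])
  rw [hsnd] at hmain
  rw [hiter, hsel, Prod.ext_iff]
  exact ⟨hmain.1, hmain.2⟩
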